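-- pv_equiv track=rewrite | github.com/mrigankpawagi/ProbeableProblems | code/q2/buggy/22_1.py | first_positive_integer
-- ===== SOURCE A (Python) =====
-- def first_positive_integer(s):
--     s = s.replace(" ", "")
--     num_str = ""
--     for char in s:
--         if char.isdigit():
--             num_str += char
--         elif num_str:
--             num = int(num_str)
--             if num > 0:
--                 return num
--             num_str = ""
--     if num_str:
--         num = int(num_str)
--         if num > 0:
--             return num
--     return -1
-- ===== SOURCE B (Python) =====
-- def _tokens(s):
--     """All maximal runs of digit characters in s, by repeated span scans."""
--     tokens = []
--     i, n = 0, len(s)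
--     while i < n:
--         if s[i].isdigit():
--             j = i + 1
--             while j < n and s[j].isdigit():
--                 j += 1
--             tokens.append(s[i:j])
--             i = j
--         else:
--             i += 1
--     return tokens
--
--
-- def _pick(tokens):
--     for tok in tokens:
--         v = int(tok)
--         if v > 0:
--             return v
--     return -1
--
--
-- def first_positive_integer(s):
--     s = s.replace(" ", "")
--     return _pick(_tokens(s))
-- ===== Notes on version B (the rewrite author's own statement) =====
-- stated objective: alternative
-- what changed: Replaces A's single interleaved scan (accumulate digits, convert-and-test on each run boundary with state resets) by a two-phase decomposition: a recursive span tokenizer extracts all maximal digit runs first, then a separate pass returns the first token with value > 0.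
import Mathlib
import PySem

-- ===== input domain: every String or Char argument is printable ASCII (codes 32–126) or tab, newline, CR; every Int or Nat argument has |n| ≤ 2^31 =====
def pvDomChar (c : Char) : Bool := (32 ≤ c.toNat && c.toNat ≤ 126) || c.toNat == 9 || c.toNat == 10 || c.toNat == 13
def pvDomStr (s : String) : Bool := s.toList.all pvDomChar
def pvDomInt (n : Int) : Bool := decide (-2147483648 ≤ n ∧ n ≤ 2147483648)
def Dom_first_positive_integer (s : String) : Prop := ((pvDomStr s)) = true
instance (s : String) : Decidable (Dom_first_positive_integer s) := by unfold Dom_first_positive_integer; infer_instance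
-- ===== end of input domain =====

-- B restructures A's interleaved accumulate-and-test scan into tokenize-all-digit-runs then pick-first-positive (alternative decomposition, same cost).

-- int(num_str) / int(tok) on a digit string (shared builtin of both programs)
def pvVal (l : List Char) : Int := (PySem.Int.ofChars? l).getD 0

-- ===== PORT A =====
-- the for-loop of A: state num = num_str (as List Char)
def fpiLoopA : List Char → List Char → Int
  | [], num =>
      if num ≠ [] then
        let n := pvVal num
        if n > 0 then n else -1
      else -1
  | c :: rest, num =>
      if PySem.Chars.isdigit c then fpiLoopA rest (num ++ [c])
      else if num ≠ [] then
        let n := pvVal num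
        if n > 0 then n else fpiLoopA rest []
      else fpiLoopA rest num

def first_positive_integer (s : String) : Int :=
  fpiLoopA (PySem.Str.replace s " " "").toList []

-- ===== PORT B =====
-- _tokens: span tokenizer; i advancing over s is the structural recursion, and the
-- inner while-loop computing the maximal digit run s[i:j] is takeWhile/dropWhile
def fpiTokens : List Char → List (List Char)
  | [] => []
  | c :: cs =>
      if PySem.Chars.isdigit c then
        (c :: cs.takeWhile PySem.Chars.isdigit) :: fpiTokens (cs.dropWhile PySem.Chars.isdigit)
      else fpiTokens cs
termination_by l => l.length
decreasing_by
  · exact Nat.lt_succ_of_le (List.length_dropWhile_le _ _)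
  · exact Nat.lt_succ_self _

-- _pick: first token with positive value
def fpiPick : List (List Char) → Int
  | [] => -1
  | t :: ts =>
      let v := pvVal t
      if v > 0 then v else fpiPick ts

def first_positive_integer_alt (s : String) : Int :=
  fpiPick (fpiTokens (PySem.Str.replace s " " "").toList)

-- ===== PRECONDITION & SPEC =====
def Spec_first_positive_integer (s : String) (out : Int) : Prop := out = first_positive_integer_alt s
instance (s : String) (out : Int) : Decidable (Spec_first_positive_integer s out) := by unfold Spec_first_positive_integer; infer_instance

-- ===== CLAIM (what is proved, stated in full; the proofs are below) =====
def Claim_equal_first_positive_integer : Prop := ∀ (s : String), Dom_first_positive_integer s → Spec_first_positive_integer s (first_positive_integer s)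

-- ===== LEMMAS AND PROOFS =====

theorem takeWhile_all {p : Char → Bool} {ds : List Char} (h : ∀ c ∈ ds, p c = true) :
    ds.takeWhile p = ds := List.takeWhile_eq_self_iff.mpr h

theorem dropWhile_all {p : Char → Bool} {ds : List Char} (h : ∀ c ∈ ds, p c = true) :
    ds.dropWhile p = [] := List.dropWhile_eq_nil_iff.mpr h

theorem takeWhile_append_not {p : Char → Bool} {ds rest : List Char} {c : Char}
    (h : ∀ x ∈ ds, p x = true) (hc : p c = false) :
    (ds ++ c :: rest).takeWhile p = ds := by
  induction ds with
  | nil => simp [hc]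
  | cons d ds ih =>
      have hd : p d = true := h d (by simp)
      simp only [List.cons_append, List.takeWhile_cons, hd]
      simp [ih (fun x hx => h x (by simp [hx]))]

theorem dropWhile_append_not {p : Char → Bool} {ds rest : List Char} {c : Char}
    (h : ∀ x ∈ ds, p x = true) (hc : p c = false) :
    (ds ++ c :: rest).dropWhile p = c :: rest := by
  induction ds with
  | nil => simp [hc]
  | cons d ds ih =>
      have hd : p d = true := h d (by simp)
      simp only [List.cons_append, List.dropWhile_cons, hd]
      exact ih (fun x hx => h x (by simp [hx]))

-- main invariant: with num an all-digit accumulator, A's loop from (l, num)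
-- computes B's pick over the tokens of num ++ l
theorem fpiLoopA_eq (l : List Char) : ∀ num : List Char,
    (∀ c ∈ num, PySem.Chars.isdigit c = true) →
    fpiLoopA l num = fpiPick (fpiTokens (num ++ l)) := by
  induction l with
  | nil =>
      intro num hnum
      cases num with
      | nil => simp [fpiLoopA, fpiTokens, fpiPick]
      | cons d ds =>
          have hd : PySem.Chars.isdigit d = true := hnum d (by simp)
          have hds : ∀ c ∈ ds, PySem.Chars.isdigit c = true :=
            fun c hc => hnum c (by simp [hc])
          simp [fpiLoopA, fpiTokens, hd, takeWhile_all hds, dropWhile_all hds, fpiPick]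
  | cons c rest ih =>
      intro num hnum
      by_cases hc : PySem.Chars.isdigit c = true
      · have : fpiLoopA (c :: rest) num = fpiLoopA rest (num ++ [c]) := by
          simp [fpiLoopA, hc]
        rw [this, ih (num ++ [c]) (by intro x hx; rcases List.mem_append.mp hx with h | h
                                      · exact hnum x h
                                      · simp at h; simpa [h] using hc)]
        simp
      · have hcf : PySem.Chars.isdigit c = false := by simpa using hc
        cases num with
        | nil =>
            have : fpiLoopA (c :: rest) [] = fpiLoopA rest [] := by
              simp [fpiLoopA, hcf]
            rw [this, ih [] (by simp)]
            simp [fpiTokens, hcf]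
        | cons d ds =>
            have hd : PySem.Chars.isdigit d = true := hnum d (by simp)
            have hds : ∀ x ∈ ds, PySem.Chars.isdigit x = true :=
              fun x hx => hnum x (by simp [hx])
            have htk : (ds ++ c :: rest).takeWhile PySem.Chars.isdigit = ds :=
              takeWhile_append_not hds hcf
            have hdw : (ds ++ c :: rest).dropWhile PySem.Chars.isdigit = c :: rest :=
              dropWhile_append_not hds hcf
            have hR : fpiTokens ((d :: ds) ++ c :: rest)
                = (d :: ds) :: fpiTokens rest := by
              rw [List.cons_append, fpiTokens]
              simp [hd, htk, hdw]
              rw [fpiTokens]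
              simp [hcf]
            rw [hR]
            have hrest := ih [] (by simp)
            simp only [List.nil_append] at hrest
            simp [fpiLoopA, hcf, fpiPick, hrest]

-- ===== VERDICT (by name: the statement is the Claim_ definition above) =====
theorem first_positive_integer_spec : Claim_equal_first_positive_integer := by
  intro s _
  unfold Spec_first_positive_integer first_positive_integer first_positive_integer_alt
  simpa using fpiLoopA_eq (PySem.Str.replace s " " "").toList [] (by simp)
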